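-- pv_equiv track=rewrite | github.com/MechaDuck/Advent_of_Code | 2025/day2/solution.py | slice_string_into_k_parts
-- ===== SOURCE A (Python) =====
-- def slice_string_into_k_parts(input_string: str, k: int) -> list[str]:
--     """
--     Slices a given string into k parts. If the string length is not
--     perfectly divisible by k, the extra characters are distributed to the
--     first parts (e.g., if length is 7 and k=3, parts might be 3, 2, 2).
--
--     Args:
--         input_string (str): The string to be sliced.
--         k (int): The desired number of parts. Must be a positive integer.
--
--     Returns:
--         list[str]: A list containing the k sliced parts.
--                 Returns an empty list if k is non-positive.
--                 If k > len(input_string), some parts at the end will be empty.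
--     """
--     n = len(input_string)
--
--     if k <= 0:
--         return []
--     if k == 1:
--         return [input_string]
--
--     # Calculate the base length for each part using integer division
--     base_length = n // k
--
--     # Calculate the number of remaining characters that need to be distributed
--     remainder = n % k
--
--     parts = []
--     current_start_index = 0
--
--     for i in range(k):
--         # Determine the length of the current part
--         # The first 'remainder' parts will get an extra character
--         part_length = base_length + (1 if i < remainder else 0)
--
--         # Slice the string to get the current part
--         part = input_string[current_start_index : current_start_index + part_length]
--         parts.append(part)
--
--         # Update the starting index for the next part
--         current_start_index += part_length
--
--     return parts
-- ===== SOURCE B (Python) =====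
-- def slice_string_into_k_parts(input_string: str, k: int) -> list[str]:
--     """Head-peel: repeatedly cut off the first part (ceil of remaining length /
--     remaining parts) and continue with the rest; once the string is exhausted
--     (or one part is left) the remaining parts are immediate."""
--     if k <= 0:
--         return []
--     parts = []
--     while k > 1 and input_string:
--         first_len = -(-len(input_string) // k)  # ceiling division
--         parts.append(input_string[:first_len])
--         input_string = input_string[first_len:]
--         k -= 1
--     return parts + ([input_string] if k == 1 else [''] * k)
-- ===== Notes on version B (the rewrite author's own statement) =====
-- stated objective: alternative
-- what changed: Replaces A's single loop over a precomputed base/remainder with a running start index by head-peeling: repeatedly cut off the first ceil(remaining_length/remaining_parts) characters and continue on the suffix with one part fewer; once the string is exhausted the remaining parts are k empty strings.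
import Mathlib
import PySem

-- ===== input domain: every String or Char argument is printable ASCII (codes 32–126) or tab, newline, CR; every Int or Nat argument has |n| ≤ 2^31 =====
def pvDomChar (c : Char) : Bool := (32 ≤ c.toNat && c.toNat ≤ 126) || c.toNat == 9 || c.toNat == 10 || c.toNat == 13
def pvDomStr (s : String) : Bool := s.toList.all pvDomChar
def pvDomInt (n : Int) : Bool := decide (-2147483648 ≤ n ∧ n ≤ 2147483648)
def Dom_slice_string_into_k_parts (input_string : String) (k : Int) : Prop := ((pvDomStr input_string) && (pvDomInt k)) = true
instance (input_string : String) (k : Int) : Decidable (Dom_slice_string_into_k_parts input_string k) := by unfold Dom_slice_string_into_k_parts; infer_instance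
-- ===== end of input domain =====

-- ===== PORT A =====
-- Header: B replaces A's base/remainder loop with a running start index by head-peeling:
-- cut off ceil(len/k) characters, continue on the rest with k-1 parts (alternative decomposition).
def slice_string_into_k_parts (input_string : String) (k : Int) : List String :=
  let n : Int := PySem.Str.len input_string
  if k ≤ 0 then []
  else if k = 1 then [input_string]
  else
    let base_length := PySem.Int.floordiv n k
    let remainder := PySem.Int.mod n k
    let st := (PySem.List.pyRange 0 k 1).foldl
      (fun (st : List String × Int) (i : Int) =>
        let part_length := base_length + (if i < remainder then 1 else 0)
        let part := PySem.Str.slice input_string (some st.2) (some (st.2 + part_length))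
        (st.1 ++ [part], st.2 + part_length))
      ([], 0)
    st.1

-- ===== PORT B =====
-- the while loop of Source B: peel off the first ceil(len/k) characters while k > 1 and
-- the string is non-empty; afterwards the remaining parts are [s] (k = 1) or k empty strings
def pvAltGo (input_string : String) (k : Int) (parts : List String) : List String :=
  if 1 < k ∧ PySem.Str.len input_string ≠ 0 then
    let first_len := -(PySem.Int.floordiv (-(PySem.Str.len input_string)) k)
    pvAltGo (PySem.Str.slice input_string (some first_len) none) (k - 1)
      (parts ++ [PySem.Str.slice input_string none (some first_len)])
  else
    parts ++ (if k = 1 then [input_string] else List.replicate k.toNat "")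
termination_by k.toNat
decreasing_by omega

def slice_string_into_k_parts_alt (input_string : String) (k : Int) : List String :=
  if k ≤ 0 then [] else pvAltGo input_string k []

-- ===== PRECONDITION & SPEC =====
def Spec_slice_string_into_k_parts (input_string : String) (k : Int) (out : List String) : Prop := out = slice_string_into_k_parts_alt input_string k
instance (input_string : String) (k : Int) (out : List String) : Decidable (Spec_slice_string_into_k_parts input_string k out) := by unfold Spec_slice_string_into_k_parts; infer_instance

-- ===== CLAIM (what is proved, stated in full; the proofs are below) =====
def Claim_equal_slice_string_into_k_parts : Prop := ∀ (input_string : String) (k : Int), Dom_slice_string_into_k_parts input_string k → Spec_slice_string_into_k_parts input_string k (slice_string_into_k_parts input_string k)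

-- ===== LEMMAS AND PROOFS =====

-- Common reference form: part j of the split is the closed-form slice
-- [j*base + min j rem, (j+1)*base + min (j+1) rem).  Both ports are proved equal to it.
def pvClosed (s : String) (k : Int) : List String :=
  let n : Int := PySem.Str.len s
  let base := PySem.Int.floordiv n k
  let rem := PySem.Int.mod n k
  (PySem.List.pyRange 0 k 1).map (fun j =>
    PySem.Str.slice s (some (j * base + min j rem)) (some ((j + 1) * base + min (j + 1) rem)))

-- Loop invariant for A: the running start index at step i equals i*base + min i rem.
lemma pv_loop_inv (s : String) (base rem k : Int) :
    ∀ (m : Nat) (i : Int) (acc : List String), (k - i).toNat = m →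
    ((PySem.List.pyRange i k 1).foldl
      (fun (st : List String × Int) (j : Int) =>
        let part_length := base + (if j < rem then 1 else 0)
        let part := PySem.Str.slice s (some st.2) (some (st.2 + part_length))
        (st.1 ++ [part], st.2 + part_length))
      (acc, i * base + min i rem)).1
    = acc ++ (PySem.List.pyRange i k 1).map (fun j =>
        PySem.Str.slice s (some (j * base + min j rem))
          (some ((j + 1) * base + min (j + 1) rem))) := by
  intro m
  induction m with
  | zero =>
    intro i acc hm
    rw [PySem.List.pyRange_one_eq_nil (by omega)]
    simp
  | succ m ih =>
    intro i acc hm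
    by_cases hik : i < k
    · rw [PySem.List.pyRange_one_cons hik]
      simp only [List.foldl_cons, List.map_cons]
      have hlen : i * base + min i rem + (base + (if i < rem then 1 else 0))
          = (i + 1) * base + min (i + 1) rem := by
        split_ifs with h
        · have h1 : min i rem = i := by omega
          have h2 : min (i + 1) rem = i + 1 := by omega
          rw [h1, h2]; ring
        · have h1 : min i rem = rem := by omega
          have h2 : min (i + 1) rem = rem := by omega
          rw [h1, h2]; ring
      rw [hlen,
        ih (i + 1) (acc ++ [PySem.Str.slice s (some (i * base + min i rem))
          (some ((i + 1) * base + min (i + 1) rem))]) (by omega)]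
      simp
    · rw [PySem.List.pyRange_one_eq_nil (by omega)]
      simp

-- the k = 1 case of the reference form: one slice covering the whole string
lemma pv_closed_one (s : String) : pvClosed s 1 = [s] := by
  unfold pvClosed
  rw [PySem.List.pyRange_one_cons (by omega : (0:Int) < 1)]
  rw [PySem.List.pyRange_one_eq_nil (by omega : (1:Int) ≤ (0:Int) + 1)]
  simp [PySem.Int.floordiv, PySem.Int.mod, PySem.Str.slice, PySem.Chars.slice,
    PySem.List.slice_toNat, PySem.Str.len, List.take_of_length_le]

-- a range of length (b-a)
lemma pv_pyRange_len : ∀ (m : Nat) (a b : Int), (b - a).toNat = m →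
    (PySem.List.pyRange a b 1).length = m := by
  intro m
  induction m with
  | zero => intro a b hm; rw [PySem.List.pyRange_one_eq_nil (by omega)]; rfl
  | succ m ih =>
    intro a b hm
    rw [PySem.List.pyRange_one_cons (by omega : a < b)]
    simp [ih (a + 1) b (by omega)]

-- the reference form on an empty string: k empty parts
lemma pv_closed_empty (s : String) (k : Int) (hk : 1 ≤ k) (h0 : PySem.Str.len s = 0) :
    pvClosed s k = List.replicate k.toNat "" := by
  have hnil : s.toList = [] := by
    rw [PySem.Str.len_eq] at h0
    exact List.eq_nil_of_length_eq_zero (by omega)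
  unfold pvClosed
  have hall : ∀ x ∈ (PySem.List.pyRange 0 k 1).map (fun j =>
      PySem.Str.slice s (some (j * PySem.Int.floordiv (PySem.Str.len s) k
        + min j (PySem.Int.mod (PySem.Str.len s) k)))
      (some ((j + 1) * PySem.Int.floordiv (PySem.Str.len s) k
        + min (j + 1) (PySem.Int.mod (PySem.Str.len s) k)))), x = "" := by
    intro x hx
    rcases List.mem_map.mp hx with ⟨j, _, rfl⟩
    unfold PySem.Str.slice PySem.Chars.slice
    rw [hnil]
    simp [PySem.List.slice]
  have hrep := List.eq_replicate_of_mem hall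
  rw [hrep, List.length_map, pv_pyRange_len k.toNat 0 k (by omega)]

-- slicing the suffix s[c:] at [a,b) is slicing s at [c+a, c+b)
lemma pv_slice_shift (s : String) (c a b : Int) (hc : 0 ≤ c) (ha : 0 ≤ a) (hb : 0 ≤ b) :
    PySem.Str.slice (PySem.Str.slice s (some c) none) (some a) (some b)
      = PySem.Str.slice s (some (c + a)) (some (c + b)) := by
  unfold PySem.Str.slice PySem.Chars.slice
  congr 1
  simp only [String.toList_ofList]
  rw [PySem.List.slice_from _ hc, PySem.List.slice_toNat _ ha hb,
    PySem.List.slice_toNat _ (by omega) (by omega), List.drop_drop]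
  have h1 : b.toNat - a.toNat = (c + b).toNat - (c + a).toNat := by omega
  have h2 : c.toNat + a.toNat = (c + a).toNat := by omega
  rw [h1, h2]

-- mapping over a shifted integer range
lemma pv_pyRange_shift {α : Type} (f g : Int → α) :
    ∀ (m : Nat) (a b : Int), (b - a).toNat = m →
    (∀ x, a ≤ x → x < b → f (x + 1) = g x) →
    (PySem.List.pyRange (a + 1) (b + 1) 1).map f = (PySem.List.pyRange a b 1).map g := by
  intro m
  induction m with
  | zero =>
    intro a b hm _
    rw [PySem.List.pyRange_one_eq_nil (by omega), PySem.List.pyRange_one_eq_nil (by omega)]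
    simp
  | succ m ih =>
    intro a b hm hfg
    rw [PySem.List.pyRange_one_cons (by omega : a < b),
      PySem.List.pyRange_one_cons (by omega : a + 1 < b + 1)]
    simp only [List.map_cons]
    rw [hfg a le_rfl (by omega), ih (a + 1) b (by omega) (fun x h1 h2 => hfg x (by omega) h2)]

-- peeling the first ceil(n/k) characters off the front of the reference form
set_option maxHeartbeats 1000000 in
lemma pv_closed_step (s : String) (k : Int) (hk2 : 2 ≤ k) :
    PySem.Str.slice s none (some (-(PySem.Int.floordiv (-(PySem.Str.len s)) k))) ::
      pvClosed (PySem.Str.slice s (some (-(PySem.Int.floordiv (-(PySem.Str.len s)) k))) none) (k - 1)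
    = pvClosed s k := by
  set n : Int := PySem.Str.len s with hn
  have hn0 : 0 ≤ n := by rw [hn, PySem.Str.len_eq]; positivity
  set base := PySem.Int.floordiv n k with hbase
  set rem := PySem.Int.mod n k with hrem
  have hdm : base * k + rem = n := PySem.Int.floordiv_mul_add_mod n k
  have hr0 : 0 ≤ rem := PySem.Int.mod_nonneg n (by omega)
  have hrk : rem < k := PySem.Int.mod_lt n (by omega)
  have hb0 : 0 ≤ base := by nlinarith
  -- the ceiling first_len is base + min 1 rem
  have hc : -PySem.Int.floordiv (-n) k = base + min 1 rem := by
    rw [PySem.Int.neg_floordiv_neg_eq_iff_of_pos (by omega : (0:Int) < k)]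
    by_cases h : rem ≤ 0
    · have : min 1 rem = 0 := by omega
      rw [this]; constructor <;> nlinarith
    · have : min 1 rem = 1 := by omega
      rw [this]; constructor <;> nlinarith
  rw [hc]
  set c := base + min 1 rem with hcdef
  have hc0 : 0 ≤ c := by omega
  have hcn : c ≤ n := by nlinarith [min_le_right 1 rem, min_le_left 1 rem]
  set s' := PySem.Str.slice s (some c) none with hs'
  have hlen' : PySem.Str.len s' = n - c := by
    rw [hs', PySem.Str.len_eq, PySem.Str.toList_slice]
    simp only [PySem.Chars.slice_eq_listSlice]
    rw [PySem.List.slice_from _ hc0, List.length_drop]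
    rw [hn, PySem.Str.len_eq] at hcn ⊢
    omega
  have hbase' : PySem.Int.floordiv (n - c) (k - 1) = base := by
    rw [PySem.Int.floordiv_eq_iff_of_pos (by omega : (0:Int) < k - 1)]
    by_cases h : rem ≤ 0
    · have : min 1 rem = 0 := by omega
      rw [hcdef, this]; constructor <;> nlinarith
    · have : min 1 rem = 1 := by omega
      rw [hcdef, this]; constructor <;> nlinarith
  have hrem' : PySem.Int.mod (n - c) (k - 1) = rem - min 1 rem := by
    have h := PySem.Int.floordiv_mul_add_mod (n - c) (k - 1)
    rw [hbase'] at h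
    have : base * (k - 1) = base * k - base := by ring
    omega
  -- peel one step off the reference form on the right
  have hhead : PySem.Str.slice s none (some c)
      = PySem.Str.slice s (some ((0:Int) * base + min 0 rem))
          (some (((0:Int) + 1) * base + min (0 + 1) rem)) := by
    have h1 : (0:Int) * base + min 0 rem = 0 := by
      have h0 : min (0:Int) rem = 0 := by omega
      rw [h0]; ring
    have h2 : ((0:Int) + 1) * base + min (0 + 1) rem = c := by
      rw [hcdef]; ring_nf
    rw [h1, h2]
    unfold PySem.Str.slice PySem.Chars.slice
    rw [PySem.List.slice_zero_start]
  have htail : pvClosed s' (k - 1)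
      = (PySem.List.pyRange ((0:Int) + 1) k 1).map (fun j =>
          PySem.Str.slice s (some (j * base + min j rem))
            (some ((j + 1) * base + min (j + 1) rem))) := by
    have h := pv_pyRange_shift
      (fun j => PySem.Str.slice s (some (j * base + min j rem))
        (some ((j + 1) * base + min (j + 1) rem)))
      (fun j => PySem.Str.slice s' (some (j * base + min j (rem - min 1 rem)))
        (some ((j + 1) * base + min (j + 1) (rem - min 1 rem))))
      (k - 1).toNat 0 (k - 1) (by omega) ?_
    · have e : k - 1 + 1 = k := by omega
      rw [e] at h
      simp only [pvClosed, hlen', hbase', hrem']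
      exact h.symm
    · intro x hx0 hxk
      beta_reduce
      rw [hs', pv_slice_shift s c _ _ hc0
        (by
          have h1 : 0 ≤ x * base := mul_nonneg hx0 hb0
          have h2 : 0 ≤ min x (rem - min 1 rem) := by omega
          linarith)
        (by
          have h1 : 0 ≤ (x + 1) * base := mul_nonneg (by omega) hb0
          have h2 : 0 ≤ min (x + 1) (rem - min 1 rem) := by omega
          linarith)]
      congr 2
      · have hmx : min (x + 1) rem = min 1 rem + min x (rem - min 1 rem) := by omega
        rw [hcdef, hmx]; ring
      · have hmx : min (x + 1 + 1) rem = min 1 rem + min (x + 1) (rem - min 1 rem) := by omega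
        rw [hcdef, hmx]; ring
  conv_lhs => rw [hhead, htail]
  conv_rhs =>
    simp only [pvClosed]
    simp only [← hn, ← hbase, ← hrem]
    rw [PySem.List.pyRange_one_cons (by omega : (0:Int) < k), List.map_cons]

-- B's while loop equals the reference form (with the accumulated prefix in front)
lemma pv_go_closed :
    ∀ (m : Nat) (k : Int) (s : String) (acc : List String), k.toNat = m → 1 ≤ k →
    pvAltGo s k acc = acc ++ pvClosed s k := by
  intro m
  induction m with
  | zero => intro k s acc hm hk; omega
  | succ m ih =>
    intro k s acc hm hk
    rw [pvAltGo]
    by_cases hcond : 1 < k ∧ PySem.Str.len s ≠ 0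
    · rw [if_pos hcond]
      rw [ih (k - 1) _ _ (by omega) (by omega)]
      rw [List.append_assoc, List.singleton_append]
      rw [pv_closed_step s k (by omega)]
    · rw [if_neg hcond]
      by_cases hk1 : k = 1
      · subst hk1
        simp [pv_closed_one]
      · have h0 : PySem.Str.len s = 0 := by
          rcases not_and_or.mp hcond with h | h
          · omega
          · exact not_not.mp h
        rw [if_neg hk1, pv_closed_empty s k hk h0]

-- ===== VERDICT (by name: the statement is the Claim_ definition above) =====
theorem slice_string_into_k_parts_spec : Claim_equal_slice_string_into_k_parts := by
  intro s k _hdom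
  unfold Spec_slice_string_into_k_parts
  by_cases hk0 : k ≤ 0
  · unfold slice_string_into_k_parts slice_string_into_k_parts_alt
    simp [hk0]
  · rw [show slice_string_into_k_parts_alt s k = pvAltGo s k [] by
        unfold slice_string_into_k_parts_alt; rw [if_neg hk0],
      pv_go_closed k.toNat k s [] rfl (by omega), List.nil_append]
    by_cases hk1 : k = 1
    · subst hk1
      unfold slice_string_into_k_parts
      rw [pv_closed_one]
      simp
    · unfold slice_string_into_k_parts
      rw [if_neg hk0, if_neg hk1]
      unfold pvClosed
      have h := pv_loop_inv s (PySem.Int.floordiv (PySem.Str.len s) k)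
        (PySem.Int.mod (PySem.Str.len s) k) k (k - 0).toNat 0 [] rfl
      rw [show (0 : Int) * PySem.Int.floordiv (PySem.Str.len s) k
          + min 0 (PySem.Int.mod (PySem.Str.len s) k) = 0 by
        rw [zero_mul, zero_add]
        have := PySem.Int.mod_nonneg (PySem.Str.len s) (show (0:Int) < k by omega)
        omega] at h
      simpa using h
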